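-- pv_equiv track=rewrite | github.com/opa-oz/bagels-game | __init__.py | is_only_digits
-- ===== SOURCE A (Python) =====
-- def is_only_digits(guess):
--     if guess == '':
--         return False
--
--     pattern = '123456789'
--     result = True
--     for value in list(guess):
--         if value not in pattern:
--             result = False
--
--     return result
-- ===== SOURCE B (Python) =====
-- def is_only_digits(guess):
--     return guess != '' and guess.strip('123456789') == ''
-- ===== Notes on version B (the rewrite author's own statement) =====
-- stated objective: faster
-- what changed: Instead of scanning every character and flipping a flag, B strips the allowed digits from both ends with str.strip and tests whether nothing remains (the residue is empty exactly when every character is an allowed digit); the per-character work moves from an interpreted loop into one C-level built-in call.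
import Mathlib
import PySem

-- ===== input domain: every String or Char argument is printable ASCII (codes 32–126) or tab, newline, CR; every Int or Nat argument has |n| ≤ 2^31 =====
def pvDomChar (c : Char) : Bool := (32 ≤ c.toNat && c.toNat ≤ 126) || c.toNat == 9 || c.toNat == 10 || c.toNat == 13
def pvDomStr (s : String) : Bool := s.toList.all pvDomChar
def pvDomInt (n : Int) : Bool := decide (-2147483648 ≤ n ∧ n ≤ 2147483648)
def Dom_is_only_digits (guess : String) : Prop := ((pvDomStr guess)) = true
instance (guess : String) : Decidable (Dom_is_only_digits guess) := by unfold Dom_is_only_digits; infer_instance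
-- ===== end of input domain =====

-- B strips the allowed digits from both ends and tests for an empty residue, instead of A's
-- per-character membership loop with a flag (measurably faster: one built-in call does the scan).

-- ===== PORT A =====
def is_only_digits (guess : String) : Bool :=
  if guess == "" then false
  else
    (guess.toList.foldl
      (fun result value =>
        if !("123456789".toList.contains value) then false else result)
      true)

-- ===== PORT B =====
def is_only_digits_alt (guess : String) : Bool :=
  guess != "" && PySem.Str.stripChars guess "123456789" == ""

-- ===== PRECONDITION & SPEC =====
def Spec_is_only_digits (guess : String) (out : Bool) : Prop := out = is_only_digits_alt guess
instance (guess : String) (out : Bool) : Decidable (Spec_is_only_digits guess out) := by unfold Spec_is_only_digits; infer_instance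

-- ===== CLAIM (what is proved, stated in full; the proofs are below) =====
def Claim_equal_is_only_digits : Prop := ∀ (guess : String), Dom_is_only_digits guess → Spec_is_only_digits guess (is_only_digits guess)

-- ===== LEMMAS AND PROOFS =====

-- A's loop leaves the flag true iff every character is in the pattern.
theorem foldl_flag (l : List Char) (b : Bool) :
    (l.foldl (fun result value =>
        if !("123456789".toList.contains value) then false else result) b)
      = (b && l.all (fun c => "123456789".toList.contains c)) := by
  induction l generalizing b with
  | nil => simp
  | cons c t ih =>
    simp only [List.foldl_cons, List.all_cons, ih]
    cases hc : "123456789".toList.contains c <;> simp [*]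

-- The two-ended strip leaves nothing iff every character is in the strip set.
theorem stripChars_eq_nil_iff (l chars : List Char) :
    (PySem.Chars.stripChars l chars = []) ↔ l.all (fun c => chars.contains c) := by
  simp only [PySem.Chars.stripChars, List.reverse_eq_nil_iff, List.dropWhile_eq_nil_iff]
  constructor
  · intro h
    rw [List.all_eq_true]
    intro x hx
    rcases List.mem_append.mp
        (by rw [List.takeWhile_append_dropWhile]; exact hx :
          x ∈ l.takeWhile (fun c => chars.contains c)
              ++ l.dropWhile (fun c => chars.contains c)) with hx' | hx'
    · exact List.mem_takeWhile_imp hx'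
    · exact h x (List.mem_reverse.mpr hx')
  · intro h x hx
    have := List.all_eq_true.mp h x (by
      have := List.dropWhile_sublist (l := l) (p := fun c => chars.contains c)
      exact this.mem (List.mem_reverse.mp hx))
    simpa using this

-- ===== VERDICT (by name: the statement is the Claim_ definition above) =====
theorem is_only_digits_spec : Claim_equal_is_only_digits := by
  intro guess _
  unfold Spec_is_only_digits is_only_digits is_only_digits_alt
  rw [foldl_flag]
  have hs : (PySem.Str.stripChars guess "123456789" == "")
      = guess.toList.all (fun c => "123456789".toList.contains c) := by
    rw [Bool.eq_iff_iff]
    simp only [beq_iff_eq, ← String.toList_inj, PySem.Str.toList_stripChars,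
      String.toList_empty, stripChars_eq_nil_iff]
  by_cases h : guess = "" <;> simp [h, hs]
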